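-- pv_equiv track=rewrite | github.com/Moustafa-Eid/Python-Programs | Unit 3/Assignment/Final Assignment/EidLoopQ1 - Final.py | isFat
-- ===== SOURCE A (Python) =====
-- def isFat(n,t):
--     for factor in range(1,n+1):
--         if n % factor == 0:
--             t += factor
--     if t > (3*n):
--         return True
--     else:
--         return False
-- ===== SOURCE B (Python) =====
-- def isFat(n, t):
--     # Enumerate divisors only up to sqrt(n), adding each divisor d and its cofactor n//d.
--     s = t
--     i = 1
--     while i * i <= n:
--         if n % i == 0:
--             s += i
--             q = n // i
--             if q != i:
--                 s += q
--         i += 1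
--     return s > 3 * n
-- ===== Notes on version B (the rewrite author's own statement) =====
-- stated objective: faster
-- what changed: B enumerates divisors only up to sqrt(n), adding each divisor together with its cofactor n//i, instead of A's trial of every factor from 1 to n.
import Mathlib
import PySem

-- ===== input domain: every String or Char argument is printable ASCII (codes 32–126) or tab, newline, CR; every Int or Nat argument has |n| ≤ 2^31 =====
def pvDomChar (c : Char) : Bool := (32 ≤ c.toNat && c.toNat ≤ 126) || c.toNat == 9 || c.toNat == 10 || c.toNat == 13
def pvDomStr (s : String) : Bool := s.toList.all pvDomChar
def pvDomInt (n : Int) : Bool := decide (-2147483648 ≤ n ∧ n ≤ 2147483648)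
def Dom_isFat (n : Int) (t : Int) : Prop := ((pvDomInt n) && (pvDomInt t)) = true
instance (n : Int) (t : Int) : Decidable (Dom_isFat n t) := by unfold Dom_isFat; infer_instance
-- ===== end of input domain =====

-- B replaces A's factor-by-factor scan of 1..n by divisor pairing up to sqrt(n); return value only.
-- ===== PORT A =====
-- A: trial-divide every factor from 1 to n, summing divisors onto t.
def isFat (n : Int) (t : Int) : Bool :=
  let t := (PySem.List.pyRange 1 (n+1) 1).foldl
    (fun acc factor => if PySem.Int.mod n factor == 0 then acc + factor else acc) t
  decide (t > 3*n)

-- ===== PORT B =====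
-- B: while i*i <= n, add divisor i and its cofactor n//i (once if they coincide).
def isFatGo (n : Int) (i : Int) (s : Int) : Int :=
  if hlt : i * i ≤ n then
    isFatGo n (i+1)
      (if PySem.Int.mod n i == 0 then
         (let q := PySem.Int.floordiv n i
          if q ≠ i then s + i + q else s + i)
       else s)
  else s
termination_by (n + 1 - i).toNat
decreasing_by
  have h2i : 2*i ≤ n + 1 := by nlinarith [mul_self_nonneg (i-1), hlt]
  have h0 : (0:Int) ≤ n := le_trans (mul_self_nonneg i) hlt
  omega

def isFat_alt (n : Int) (t : Int) : Bool :=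
  decide (isFatGo n 1 t > 3*n)

-- ===== PRECONDITION & SPEC =====
def Spec_isFat (n : Int) (t : Int) (out : Bool) : Prop := out = isFat_alt n t
instance (n : Int) (t : Int) (out : Bool) : Decidable (Spec_isFat n t out) := by unfold Spec_isFat; infer_instance

-- ===== CLAIM (what is proved, stated in full; the proofs are below) =====
def Claim_equal_isFat : Prop := ∀ (n : Int) (t : Int), Dom_isFat n t → Spec_isFat n t (isFat n t)

-- ===== LEMMAS AND PROOFS =====

-- generic: a conditional-accumulate foldl is the sum of the filtered list
theorem foldl_if_add_eq (p : Int → Bool) (l : List Int) (t : Int) :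
    l.foldl (fun acc d => if p d then acc + d else acc) t = t + (l.filter p).sum := by
  induction l generalizing t with
  | nil => simp
  | cons x xs ih =>
    simp only [List.foldl_cons, List.filter_cons]
    by_cases hx : p x
    · simp only [hx, if_true, ih, List.sum_cons]; ring
    · simp [hx, ih]

-- sorry-placeholder lemmas, filled below
theorem aSide (n t : Int) (_hn : 1 ≤ n) :
    (PySem.List.pyRange 1 (n+1) 1).foldl
      (fun acc factor => if PySem.Int.mod n factor == 0 then acc + factor else acc) t
    = t + ∑ x ∈ (Finset.Icc 1 n).filter (fun x => x ∣ n), x := by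
  rw [foldl_if_add_eq]
  congr 1
  have hnd : ((PySem.List.pyRange 1 (n+1) 1).filter
      (fun d => PySem.Int.mod n d == 0)).Nodup :=
    (PySem.List.nodup_pyRange_one 1 (n+1)).filter _
  have hset : ((PySem.List.pyRange 1 (n+1) 1).filter
      (fun d => PySem.Int.mod n d == 0)).toFinset
      = (Finset.Icc 1 n).filter (fun x => x ∣ n) := by
    apply Finset.ext
    intro x
    simp only [List.mem_toFinset, List.mem_filter, PySem.List.mem_pyRange_one,
      Finset.mem_filter, Finset.mem_Icc, beq_iff_eq, PySem.Int.mod_eq_zero_iff_dvd]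
    omega
  calc ((PySem.List.pyRange 1 (n+1) 1).filter (fun d => PySem.Int.mod n d == 0)).sum
      = (((PySem.List.pyRange 1 (n+1) 1).filter
          (fun d => PySem.Int.mod n d == 0)).map id).sum := by simp
    _ = ∑ x ∈ (Finset.Icc 1 n).filter (fun x => x ∣ n), x := by
          rw [← hset, List.sum_toFinset _ hnd]; rfl

-- basic facts about the cofactor n / a of a positive divisor a of n
theorem cofactor_facts (n a : Int) (hn : 1 ≤ n) (ha1 : 1 ≤ a) (hd : a ∣ n) :
    1 ≤ n / a ∧ n / a ≤ n ∧ n / a ∣ n ∧ (n / a) * a = n ∧ n / (n / a) = a := by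
  obtain ⟨c, hc⟩ := hd
  have ha0 : a ≠ 0 := by omega
  have hdiv : n / a = c := by rw [hc, Int.mul_ediv_cancel_left _ ha0]
  have hc1 : 1 ≤ c := by nlinarith
  refine ⟨by omega, ?_, ⟨a, by rw [hdiv, hc]; ring⟩, by rw [hdiv, hc]; ring, ?_⟩
  · rw [hdiv]; exact Int.le_of_dvd (by omega) ⟨a, by rw [hc]; ring⟩
  · rw [hdiv, hc, mul_comm, Int.mul_ediv_cancel_left _ (by omega)]

-- loop invariant for isFatGo: it adds, for every divisor x ≥ i with x*x ≤ n,
-- x plus (unless x*x = n) the cofactor n // x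
theorem bInv (n : Int) (hn : 1 ≤ n) (i s : Int) (hi : 1 ≤ i) :
    isFatGo n i s = s + ∑ x ∈ (Finset.Icc 1 n).filter
        (fun x => x ∣ n ∧ i ≤ x ∧ x * x ≤ n),
      (x + if x * x = n then 0 else n / x) := by
  have H : ∀ k : Nat, ∀ i s : Int, 1 ≤ i → (n + 1 - i).toNat = k →
      isFatGo n i s = s + ∑ x ∈ (Finset.Icc 1 n).filter
          (fun x => x ∣ n ∧ i ≤ x ∧ x * x ≤ n),
        (x + if x * x = n then 0 else n / x) := by
    intro k
    induction k using Nat.strong_induction_on with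
    | _ k ih =>
      intro i s hi hk
      rw [isFatGo]
      by_cases h : i * i ≤ n
      · rw [dif_pos h]
        have hin : i ≤ n := by nlinarith
        rw [ih (n + 1 - (i+1)).toNat (by omega) (i+1) _ (by omega) rfl]
        by_cases hdvd : i ∣ n
        · have hmod : (PySem.Int.mod n i == 0) = true := by
            simpa [PySem.Int.mod_eq_zero_iff_dvd] using hdvd
          obtain ⟨hc1, hcn, hcd, hmul, hinv⟩ := cofactor_facts n i hn hi hdvd
          have hq : PySem.Int.floordiv n i = n / i :=
            PySem.Int.floordiv_eq_ediv_of_pos (by omega)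
          have hS : (Finset.Icc 1 n).filter (fun x => x ∣ n ∧ i ≤ x ∧ x * x ≤ n)
              = insert i ((Finset.Icc 1 n).filter
                  (fun x => x ∣ n ∧ i + 1 ≤ x ∧ x * x ≤ n)) := by
            apply Finset.ext
            intro x
            simp only [Finset.mem_insert, Finset.mem_filter, Finset.mem_Icc]
            constructor
            · rintro ⟨hx, hd2, hix, hxx⟩
              rcases eq_or_ne x i with rfl | hne
              · exact Or.inl rfl
              · exact Or.inr ⟨hx, hd2, by omega, hxx⟩
            · rintro (rfl | ⟨hx, hd2, hix, hxx⟩)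
              · exact ⟨⟨hi, hin⟩, hdvd, le_refl _, h⟩
              · exact ⟨hx, hd2, by omega, hxx⟩
          have hnm : i ∉ (Finset.Icc 1 n).filter
              (fun x => x ∣ n ∧ i + 1 ≤ x ∧ x * x ≤ n) := by
            simp only [Finset.mem_filter, Finset.mem_Icc]
            rintro ⟨_, _, hbad, _⟩
            omega
          rw [hS, Finset.sum_insert hnm]
          have hiff : n / i = i ↔ i * i = n := by
            constructor
            · intro he; rw [he] at hmul; exact hmul
            · intro he
              have : (n / i) * i = i * i := by rw [hmul, he]
              exact mul_right_cancel₀ (by omega) this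
          simp only [hmod, if_true, hq]
          by_cases heq : n / i = i
          · rw [if_neg (by simpa using heq), if_pos (hiff.mp heq)]
            ring
          · rw [if_pos (by simpa using heq), if_neg (fun hc => heq (hiff.mpr hc))]
            ring
        · have hmod : (PySem.Int.mod n i == 0) = false := by
            simpa [PySem.Int.mod_eq_zero_iff_dvd] using hdvd
          have hS : (Finset.Icc 1 n).filter (fun x => x ∣ n ∧ i ≤ x ∧ x * x ≤ n)
              = (Finset.Icc 1 n).filter
                  (fun x => x ∣ n ∧ i + 1 ≤ x ∧ x * x ≤ n) := by
            apply Finset.ext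
            intro x
            simp only [Finset.mem_filter, Finset.mem_Icc]
            constructor
            · rintro ⟨hx, hd2, hix, hxx⟩
              rcases eq_or_ne x i with rfl | hne
              · exact absurd hd2 hdvd
              · exact ⟨hx, hd2, by omega, hxx⟩
            · rintro ⟨hx, hd2, hix, hxx⟩
              exact ⟨hx, hd2, by omega, hxx⟩
          rw [hS]
          simp [hmod]
      · rw [dif_neg h]
        have hS : (Finset.Icc 1 n).filter (fun x => x ∣ n ∧ i ≤ x ∧ x * x ≤ n) = ∅ := by
          apply Finset.eq_empty_of_forall_notMem
          intro x
          simp only [Finset.mem_filter, Finset.mem_Icc]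
          rintro ⟨⟨hx1, hx2⟩, _, hix, hxx⟩
          have : i * i ≤ x * x := mul_le_mul hix hix (by omega) (by omega)
          omega
        rw [hS]
        simp
  exact H _ i s hi rfl

-- pairing x ↦ n / x matches divisors below sqrt n with those above
theorem pairing (n : Int) (hn : 1 ≤ n) :
    ∑ x ∈ (Finset.Icc 1 n).filter (fun x => x ∣ n ∧ x * x < n), n / x
    = ∑ x ∈ (Finset.Icc 1 n).filter (fun x => x ∣ n ∧ ¬ x * x ≤ n), x := by
  refine Finset.sum_nbij' (fun x => n / x) (fun y => n / y) ?_ ?_ ?_ ?_ ?_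
  · intro a ha
    simp only [Finset.mem_filter, Finset.mem_Icc] at ha ⊢
    obtain ⟨⟨ha1, han⟩, had, haa⟩ := ha
    obtain ⟨hc1, hcn, hcd, hmul, hinv⟩ := cofactor_facts n a hn ha1 had
    have hlt : a < n / a := by nlinarith
    refine ⟨⟨hc1, hcn⟩, hcd, ?_⟩
    nlinarith
  · intro b hb
    simp only [Finset.mem_filter, Finset.mem_Icc] at hb ⊢
    obtain ⟨⟨hb1, hbn⟩, hbd, hbb⟩ := hb
    obtain ⟨hc1, hcn, hcd, hmul, hinv⟩ := cofactor_facts n b hn hb1 hbd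
    have hlt : n / b < b := by nlinarith
    refine ⟨⟨hc1, hcn⟩, hcd, ?_⟩
    nlinarith
  · intro a ha
    simp only [Finset.mem_filter, Finset.mem_Icc] at ha
    exact (cofactor_facts n a hn ha.1.1 ha.2.1).2.2.2.2
  · intro b hb
    simp only [Finset.mem_filter, Finset.mem_Icc] at hb
    exact (cofactor_facts n b hn hb.1.1 hb.2.1).2.2.2.2
  · intro a ha
    rfl

theorem bSide (n t : Int) (hn : 1 ≤ n) :
    isFatGo n 1 t = t + ∑ x ∈ (Finset.Icc 1 n).filter (fun x => x ∣ n), x := by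
  rw [bInv n hn 1 t (le_refl 1)]
  congr 1
  have h1 : (Finset.Icc 1 n).filter (fun x => x ∣ n ∧ 1 ≤ x ∧ x * x ≤ n)
      = ((Finset.Icc 1 n).filter (fun x => x ∣ n)).filter (fun x => x * x ≤ n) := by
    rw [Finset.filter_filter]
    apply Finset.filter_congr
    intro x hx
    simp only [Finset.mem_Icc] at hx
    constructor
    · rintro ⟨hd, _, hle⟩; exact ⟨hd, hle⟩
    · rintro ⟨hd, hle⟩; exact ⟨hd, hx.1, hle⟩
  rw [h1, Finset.sum_add_distrib]
  have h2 : ∑ x ∈ ((Finset.Icc 1 n).filter (fun x => x ∣ n)).filter (fun x => x * x ≤ n),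
        (if x * x = n then 0 else n / x)
      = ∑ x ∈ ((Finset.Icc 1 n).filter (fun x => x ∣ n)).filter (fun x => ¬ x * x ≤ n), x := by
    have e1 : ∑ x ∈ ((Finset.Icc 1 n).filter (fun x => x ∣ n)).filter (fun x => x * x ≤ n),
          (if x * x = n then 0 else n / x)
        = ∑ x ∈ ((Finset.Icc 1 n).filter (fun x => x ∣ n)).filter (fun x => x * x ≤ n),
          (if x * x ≠ n then n / x else 0) := by
      apply Finset.sum_congr rfl
      intro x _
      by_cases hx : x * x = n <;> simp [hx]
    rw [e1, ← Finset.sum_filter]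
    have e2 : (((Finset.Icc 1 n).filter (fun x => x ∣ n)).filter
          (fun x => x * x ≤ n)).filter (fun x => x * x ≠ n)
        = (Finset.Icc 1 n).filter (fun x => x ∣ n ∧ x * x < n) := by
      rw [Finset.filter_filter, Finset.filter_filter]
      apply Finset.filter_congr
      intro x _
      constructor
      · rintro ⟨hd, hle, hne⟩; exact ⟨hd, by omega⟩
      · rintro ⟨hd, hlt⟩; exact ⟨hd, by omega, by omega⟩
    rw [e2, pairing n hn, ← Finset.filter_filter]
  rw [h2, Finset.sum_filter_add_sum_filter_not]

-- ===== VERDICT (by name: the statement is the Claim_ definition above) =====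
theorem isFat_spec : Claim_equal_isFat := by
  intro n t _
  unfold Spec_isFat isFat isFat_alt
  by_cases hn : 1 ≤ n
  · rw [aSide n t hn, bSide n t hn]
  · have h1 : PySem.List.pyRange 1 (n+1) 1 = [] :=
      PySem.List.pyRange_one_eq_nil (by omega)
    have h2 : isFatGo n 1 t = t := by
      rw [isFatGo]; simp only [one_mul]; rw [dif_neg (by omega)]
    simp [h1, h2]
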